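-- pv_equiv track=rewrite | github.com/rohanvinaik/Wayfinder | src/lean_interface.py | build_suffix_index
-- ===== SOURCE A (Python) =====
-- def build_suffix_index(entity_names: list[str]) -> dict[str, list[str]]:
--     """Build a suffix → full_name index for name qualification."""
--     idx: dict[str, list[str]] = {}
--     for name in entity_names:
--         parts = name.split('.')
--         for i in range(len(parts)):
--             suffix = '.'.join(parts[i:])
--             idx.setdefault(suffix, []).append(name)
--     return idx
-- ===== SOURCE B (Python) =====
-- def build_suffix_index(entity_names: list[str]) -> dict[str, list[str]]:
--     """Build a suffix -> full_name index for name qualification.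
--
--     Scans each name's characters once: the suffixes are the name itself plus
--     the substring after every '.', so no split/join/re-slicing of part lists
--     is needed at all.
--     """
--     idx: dict[str, list[str]] = {}
--     for name in entity_names:
--         suffixes = [name]
--         for i, ch in enumerate(name):
--             if ch == '.':
--                 suffixes.append(name[i + 1:])
--         for suffix in suffixes:
--             idx.setdefault(suffix, []).append(name)
--     return idx
-- ===== Notes on version B (the rewrite author's own statement) =====
-- stated objective: alternative
-- what changed: B never splits the name: it scans the characters once and takes the name plus the substring after each '.' as the suffixes, instead of splitting into parts and re-joining parts[i:] for every start index.
import Mathlib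
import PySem

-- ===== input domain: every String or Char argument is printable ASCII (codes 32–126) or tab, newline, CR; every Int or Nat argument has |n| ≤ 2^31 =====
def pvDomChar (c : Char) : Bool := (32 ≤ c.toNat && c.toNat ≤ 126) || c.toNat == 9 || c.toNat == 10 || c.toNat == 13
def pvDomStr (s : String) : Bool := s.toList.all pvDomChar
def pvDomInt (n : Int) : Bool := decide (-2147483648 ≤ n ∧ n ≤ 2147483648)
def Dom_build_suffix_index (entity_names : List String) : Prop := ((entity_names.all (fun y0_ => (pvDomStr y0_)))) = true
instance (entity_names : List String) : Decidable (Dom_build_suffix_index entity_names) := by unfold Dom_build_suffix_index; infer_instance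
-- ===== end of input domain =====

-- B scans each name's characters once and takes the name plus the substring after each
-- '.' as the suffixes, instead of splitting into parts and re-joining parts[i:] for
-- every start index (objective: alternative).

-- ===== PORT A =====
def build_suffix_index (entity_names : List String) : List (String × List String) :=
  (entity_names.foldl (fun (idx : PySem.Dict String (List String)) name =>
      let parts := (PySem.Str.split? name ".").getD []   -- sep "." ≠ "", so split? is always `some`
      (PySem.List.pyRange 0 parts.length 1).foldl (fun idx i =>
        let suffix := PySem.Str.join "." (PySem.List.slice parts (some i) none)
        -- idx.setdefault(suffix, []).append(name)
        idx.modify suffix [] (fun l => l ++ [name])) idx)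
    PySem.Dict.empty).items

-- ===== PORT B =====
def build_suffix_index_alt (entity_names : List String) : List (String × List String) :=
  (entity_names.foldl (fun (idx : PySem.Dict String (List String)) name =>
      -- suffixes = [name]; for i, ch in enumerate(name): if ch == '.': suffixes.append(name[i+1:])
      let suffixes := (PySem.List.enumerate name.toList 0).foldl
        (fun (sufs : List String) ic =>
          if ic.2 == '.' then sufs ++ [PySem.Str.slice name (some (ic.1 + 1)) none] else sufs)
        [name]
      suffixes.foldl (fun idx suffix => idx.modify suffix [] (fun l => l ++ [name])) idx)
    PySem.Dict.empty).items

-- ===== PRECONDITION & SPEC =====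
def Spec_build_suffix_index (entity_names : List String) (out : List (String × List String)) : Prop := out = build_suffix_index_alt entity_names
instance (entity_names : List String) (out : List (String × List String)) : Decidable (Spec_build_suffix_index entity_names out) := by unfold Spec_build_suffix_index; infer_instance

-- ===== CLAIM (what is proved, stated in full; the proofs are below) =====
def Claim_equal_build_suffix_index : Prop := ∀ (entity_names : List String), Dom_build_suffix_index entity_names → Spec_build_suffix_index entity_names (build_suffix_index entity_names)

-- ===== LEMMAS AND PROOFS =====

-- structural form of Chars.splitOn on the single-character separator '.'
def spDot : List Char → List (List Char)
  | [] => [[]]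
  | c :: rest =>
    if c == '.' then [] :: spDot rest
    else match spDot rest with
      | [] => [[c]]
      | h :: t => (c :: h) :: t

-- the substrings after each '.' (B's extra suffixes), left to right
def dotTails : List Char → List (List Char)
  | [] => []
  | c :: rest => if c == '.' then rest :: dotTails rest else dotTails rest

-- A's suffix list for one name, at the string level
def sufsP (parts : List String) : List String :=
  (List.range parts.length).map (fun i => PySem.Str.join "." (parts.drop i))

-- … and at the char-list level
def sufsPc (ps : List (List Char)) : List String :=
  (List.range ps.length).map (fun i => String.ofList (PySem.Chars.join ['.'] (ps.drop i)))

def consHead (pre : List Char) : List (List Char) → List (List Char)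
  | [] => [pre]
  | h :: t => (pre ++ h) :: t

lemma spDot_ne_nil (cs : List Char) : spDot cs ≠ [] := by
  cases cs with
  | nil => simp [spDot]
  | cons c rest =>
    simp only [spDot]
    split
    · simp
    · cases h : spDot rest <;> simp

lemma consHead_nil_eq (ps : List (List Char)) (h : ps ≠ []) : consHead [] ps = ps := by
  cases ps with
  | nil => exact absurd rfl h
  | cons p t => simp [consHead]

lemma go_spec : ∀ (fuel : Nat) (l cur : List Char) (acc : List (List Char)),
    l.length < fuel →
    PySem.Chars.splitOn.go ['.'] fuel l cur acc
      = acc.reverse ++ consHead cur.reverse (spDot l) := by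
  intro fuel
  induction fuel with
  | zero => intro l cur acc h; omega
  | succ f ih =>
    intro l cur acc h
    cases l with
    | nil =>
      simp [PySem.Chars.splitOn.go, spDot, consHead]
    | cons c rest =>
      rw [PySem.Chars.splitOn.go]
      by_cases hc : c == '.'
      · have hp : List.isPrefixOf ['.'] (c :: rest) = true := by
          simp only [List.isPrefixOf, Bool.and_true]
          simpa [BEq.comm] using hc
        simp only [hp, if_true, List.length_cons] at *
        rw [show List.drop (List.length ([] : List Char) + 1) (c :: rest) = rest from by simp]
        rw [ih rest [] (cur.reverse :: acc) (by simp at h; omega)]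
        simp only [spDot, hc, if_true, List.reverse_nil]
        rw [consHead_nil_eq _ (spDot_ne_nil rest)]
        simp [consHead]
      · have hp : List.isPrefixOf ['.'] (c :: rest) = false := by
          simp only [List.isPrefixOf, Bool.and_true]
          simpa [BEq.comm] using hc
        simp only [hp, Bool.false_eq_true, if_false]
        rw [ih rest (c :: cur) acc (by simp at h ⊢; omega)]
        simp only [spDot, hc, Bool.false_eq_true, if_false]
        cases hsp : spDot rest with
        | nil => exact absurd hsp (spDot_ne_nil rest)
        | cons hh tt => simp [consHead]

lemma splitOn_eq_spDot (cs : List Char) :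
    PySem.Chars.splitOn cs ['.'] = spDot cs := by
  unfold PySem.Chars.splitOn
  rw [go_spec (cs.length + 1) cs [] [] (by omega)]
  simp [consHead_nil_eq _ (spDot_ne_nil cs)]

lemma join_cons_head (c : List Char) (h : List Char) (t : List (List Char)) :
    PySem.Chars.join ['.'] ((c ++ h) :: t) = c ++ PySem.Chars.join ['.'] (h :: t) := by
  cases t with
  | nil => simp [PySem.Chars.join_singleton]
  | cons q r => simp [PySem.Chars.join_cons_cons]

lemma join_spDot (cs : List Char) : PySem.Chars.join ['.'] (spDot cs) = cs := by
  induction cs with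
  | nil => simp [spDot, PySem.Chars.join_singleton]
  | cons c rest ih =>
    by_cases hc : c == '.'
    · have hceq : c = '.' := by simpa using hc
      simp only [spDot, hc, if_true]
      cases hsp : spDot rest with
      | nil => exact absurd hsp (spDot_ne_nil rest)
      | cons hh tt =>
        rw [PySem.Chars.join_cons_cons]
        rw [hsp] at ih
        simp [ih, hceq]
    · simp only [spDot, hc, Bool.false_eq_true, if_false]
      cases hsp : spDot rest with
      | nil => exact absurd hsp (spDot_ne_nil rest)
      | cons hh tt =>
        rw [hsp] at ih
        show PySem.Chars.join ['.'] ((c :: hh) :: tt) = c :: rest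
        rw [show (c :: hh) = [c] ++ hh from rfl, join_cons_head, ih]
        rfl

lemma sufsPc_cons (p : List Char) (ps : List (List Char)) :
    sufsPc (p :: ps) = String.ofList (PySem.Chars.join ['.'] (p :: ps)) :: sufsPc ps := by
  simp [sufsPc, List.range_succ_eq_map, List.map_map, Function.comp]

lemma sufsPc_spDot (cs : List Char) :
    sufsPc (spDot cs) = String.ofList cs :: (dotTails cs).map String.ofList := by
  induction cs with
  | nil =>
    simp [spDot, dotTails, sufsPc, PySem.Chars.join_singleton]
  | cons c rest ih =>
    by_cases hc : c == '.'
    · have hceq : c = '.' := by simpa using hc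
      simp only [spDot, dotTails, hc, if_true]
      cases hsp : spDot rest with
      | nil => exact absurd hsp (spDot_ne_nil rest)
      | cons hh tt =>
        rw [sufsPc_cons]
        have hj : PySem.Chars.join ['.'] (hh :: tt) = rest := by
          have := join_spDot rest; rw [hsp] at this; exact this
        rw [PySem.Chars.join_cons_cons]
        rw [hsp] at ih
        rw [ih, hj]
        simp [hceq]
    · simp only [spDot, dotTails, hc, Bool.false_eq_true, if_false]
      cases hsp : spDot rest with
      | nil => exact absurd hsp (spDot_ne_nil rest)
      | cons hh tt =>
        show sufsPc ((c :: hh) :: tt) = _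
        rw [sufsPc_cons]
        rw [hsp, sufsPc_cons] at ih
        have htail : sufsPc tt = (dotTails rest).map String.ofList := (List.cons.injEq _ _ _ _ ▸ ih).2
        have hhead : PySem.Chars.join ['.'] ((c :: hh) :: tt) = c :: rest := by
          rw [show (c :: hh) = [c] ++ hh from rfl, join_cons_head]
          have hj : PySem.Chars.join ['.'] (hh :: tt) = rest := by
            have := join_spDot rest; rw [hsp] at this; exact this
          simp [hj]
        rw [hhead, htail]

-- string-level: A's suffix list for one name is the name followed by the dot-tails
lemma sufsP_eq (name : String) :
    sufsP ((PySem.Str.split? name ".").getD [])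
      = name :: (dotTails name.toList).map String.ofList := by
  have hsplit : ((PySem.Str.split? name ".").getD []).map String.toList = spDot name.toList := by
    have hm := PySem.Str.split?_map name "."
    rw [show ("." : String).toList = ['.'] from rfl] at hm
    rw [PySem.Chars.split?] at hm
    simp only [List.isEmpty_cons] at hm
    cases hs : PySem.Str.split? name "." with
    | none => rw [hs] at hm; simp at hm
    | some parts =>
      rw [hs] at hm
      simp only [Option.map_some] at hm
      simpa [splitOn_eq_spDot] using hm
  have hmapped : (sufsP ((PySem.Str.split? name ".").getD [])).map String.toList
      = (name :: (dotTails name.toList).map String.ofList).map String.toList := by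
    have h1 : (sufsP ((PySem.Str.split? name ".").getD [])).map String.toList
        = (sufsPc (spDot name.toList)).map String.toList := by
      rw [← hsplit]
      simp only [sufsP, sufsPc, List.map_map, List.length_map]
      apply List.map_congr_left
      intro i _
      simp only [Function.comp]
      rw [PySem.Str.toList_join, String.toList_ofList, ← List.map_drop]
      simp
    rw [h1, sufsPc_spDot]
    simp
  exact List.map_injective_iff.mpr (fun _ _ => String.toList_injective) hmapped

-- B's inner scan collects exactly [name] ++ the dot-tails (as name[i+1:] slices)
lemma enumFold_spec (name : String) : ∀ (cs : List Char) (s : Nat), name.toList.drop s = cs →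
    ∀ (acc : List String),
    (PySem.List.enumerate cs (s : Int)).foldl
      (fun (sufs : List String) ic =>
        if ic.2 == '.' then sufs ++ [PySem.Str.slice name (some (ic.1 + 1)) none] else sufs)
      acc
    = acc ++ (dotTails cs).map String.ofList := by
  intro cs
  induction cs with
  | nil => intro s _ acc; simp [PySem.List.enumerate_nil, dotTails]
  | cons c rest ih =>
    intro s hdrop acc
    have hrest : name.toList.drop (s + 1) = rest := by
      rw [← List.drop_drop, hdrop]
      rfl
    rw [PySem.List.enumerate_cons]
    by_cases hc : c == '.'
    · simp only [List.foldl_cons, hc, if_true]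
      have hslice : PySem.Str.slice name (some ((s : Int) + 1)) none = String.ofList rest := by
        apply String.toList_injective
        rw [PySem.Str.toList_slice, String.toList_ofList,
          PySem.Chars.slice_eq_listSlice,
          show ((s : Int) + 1) = ((s + 1 : Nat) : Int) from by push_cast; ring,
          PySem.List.slice_from_natCast, hrest]
      rw [hslice, show ((s : Int) + 1) = ((s + 1 : Nat) : Int) from by push_cast; ring,
        ih (s + 1) hrest (acc ++ [String.ofList rest])]
      simp [dotTails, hc]
    · simp only [List.foldl_cons, hc, Bool.false_eq_true, if_false]
      rw [show ((s : Int) + 1) = ((s + 1 : Nat) : Int) from by push_cast; ring,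
        ih (s + 1) hrest acc]
      simp [dotTails, hc]

-- A's inner loop is a fold of the dict-update over sufsP parts
lemma innerA_eq {D : Type} (step : D → String → D) (parts : List String) (idx : D) :
    (PySem.List.pyRange 0 parts.length 1).foldl
        (fun d i => step d (PySem.Str.join "." (PySem.List.slice parts (some i) none))) idx
    = (sufsP parts).foldl step idx := by
  rw [PySem.List.pyRange_zero_nat, List.foldl_map]
  unfold sufsP
  rw [List.foldl_map]
  apply PySem.List.foldl_congr_mem
  intro d i _
  rw [PySem.List.slice_from_natCast]

-- ===== VERDICT (by name: the statement is the Claim_ definition above) =====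
theorem build_suffix_index_spec : Claim_equal_build_suffix_index := by
  intro entity_names _
  unfold Spec_build_suffix_index build_suffix_index build_suffix_index_alt
  congr 1
  apply PySem.List.foldl_congr_mem
  intro idx name _
  have hB : (PySem.List.enumerate name.toList 0).foldl
      (fun (sufs : List String) ic =>
        if ic.2 == '.' then sufs ++ [PySem.Str.slice name (some (ic.1 + 1)) none] else sufs)
      [name] = name :: (dotTails name.toList).map String.ofList := by
    rw [show (0 : Int) = ((0 : Nat) : Int) from rfl,
      enumFold_spec name name.toList 0 (by simp) [name]]
    rfl
  show (PySem.List.pyRange 0 ((PySem.Str.split? name ".").getD []).length 1).foldl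
      (fun idx i => idx.modify
        (PySem.Str.join "." (PySem.List.slice ((PySem.Str.split? name ".").getD []) (some i) none))
        [] (fun l => l ++ [name])) idx
    = ((PySem.List.enumerate name.toList 0).foldl
        (fun (sufs : List String) ic =>
          if ic.2 == '.' then sufs ++ [PySem.Str.slice name (some (ic.1 + 1)) none] else sufs)
        [name]).foldl (fun idx suffix => idx.modify suffix [] (fun l => l ++ [name])) idx
  rw [hB, innerA_eq (fun d s => d.modify s [] (fun l => l ++ [name]))
      ((PySem.Str.split? name ".").getD []) idx, sufsP_eq]
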